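-- pv_equiv track=rewrite | github.com/paiml/depyler | examples/hard_lang_cps_transform.py | count_continuations
-- ===== SOURCE A (Python) =====
-- from typing import List, Tuple
--
-- def count_continuations(cps: List[List[int]]) -> int:
--     conts: List[int] = []
--     for c in cps:
--         if len(c) > 2:
--             last: int = c[len(c) - 1]
--             found: bool = False
--             for existing in conts:
--                 if existing == last:
--                     found = True
--             if not found:
--                 conts.append(last)
--     return len(conts)
-- ===== SOURCE B (Python) =====
-- def count_continuations(cps):
--     lasts = sorted(c[-1] for c in cps if len(c) > 2)
--     count = 0
--     prev = None
--     for x in lasts: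
--         if prev is None or x != prev:
--             count += 1
--         prev = x
--     return count
-- ===== Notes on version B (the rewrite author's own statement) =====
-- stated objective: alternative
-- what changed: B collects the last elements of the long sublists into a list, sorts it, and counts runs of equal values in a single scan with a 'previous element' state, instead of A's quadratic membership scan over a growing dedup list.
import Mathlib
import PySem

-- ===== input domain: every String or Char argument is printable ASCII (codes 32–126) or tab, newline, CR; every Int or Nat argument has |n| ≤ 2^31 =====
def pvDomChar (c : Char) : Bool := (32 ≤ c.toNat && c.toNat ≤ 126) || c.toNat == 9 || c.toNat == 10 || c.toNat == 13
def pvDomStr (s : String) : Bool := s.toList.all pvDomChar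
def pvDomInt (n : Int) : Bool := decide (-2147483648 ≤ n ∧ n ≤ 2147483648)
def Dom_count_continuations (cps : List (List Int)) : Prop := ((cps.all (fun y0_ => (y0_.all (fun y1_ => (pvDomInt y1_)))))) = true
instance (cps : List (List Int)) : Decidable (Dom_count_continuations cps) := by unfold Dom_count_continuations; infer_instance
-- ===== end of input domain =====

-- B sorts the collected last elements and counts runs of equal values in one scan,
-- instead of A's membership scan over a growing dedup list (alternative algorithm).


-- ===== PORT A =====
-- c[len(c)-1]: the index is in range whenever len(c) > 2, so pyGet? is always `some`; .getD 0 is never the default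
def count_continuations (cps : List (List Int)) : Int :=
  let conts := cps.foldl (fun (conts : List Int) c =>
    if 2 < (c.length : Int) then
      let last : Int := (PySem.List.pyGet? c ((c.length : Int) - 1)).getD 0
      let found := conts.foldl (fun found existing => if existing == last then true else found) false
      if !found then conts ++ [last] else conts
    else conts) []
  (conts.length : Int)

-- ===== PORT B =====
-- c[-1]: pyGet? c (-1) is always `some` for the nonempty c the filter keeps; .getD 0 never fires
def count_continuations_alt (cps : List (List Int)) : Int :=
  let lasts := PySem.List.sorted
    ((cps.filter (fun c => decide (2 < (c.length : Int)))).map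
      (fun c => (PySem.List.pyGet? c (-1)).getD 0)) (fun x => x) false
  let r := lasts.foldl (fun (st : Int × Option Int) x =>
      ((if st.2 = none ∨ st.2 ≠ some x then st.1 + 1 else st.1), some x))
    ((0 : Int), (none : Option Int))
  r.1

-- ===== PRECONDITION & SPEC =====
def Spec_count_continuations (cps : List (List Int)) (out : Int) : Prop := out = count_continuations_alt cps
instance (cps : List (List Int)) (out : Int) : Decidable (Spec_count_continuations cps out) := by unfold Spec_count_continuations; infer_instance

-- ===== CLAIM (what is proved, stated in full; the proofs are below) =====
def Claim_equal_count_continuations : Prop := ∀ (cps : List (List Int)), Dom_count_continuations cps → Spec_count_continuations cps (count_continuations cps)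

-- ===== LEMMAS AND PROOFS =====

-- A's loop body and B's loop body, named so the lemmas can speak about them (definitionally the ports' lambdas)
def pvStepA (conts : List Int) (c : List Int) : List Int :=
  if 2 < (c.length : Int) then
    let last : Int := (PySem.List.pyGet? c ((c.length : Int) - 1)).getD 0
    let found := conts.foldl (fun found existing => if existing == last then true else found) false
    if !found then conts ++ [last] else conts
  else conts

def pvStepB (st : Int × Option Int) (x : Int) : Int × Option Int :=
  ((if st.2 = none ∨ st.2 ≠ some x then st.1 + 1 else st.1), some x)

-- the list of last elements of the long sublists (B's extraction)
def pvLasts (cps : List (List Int)) : List Int :=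
  (cps.filter (fun c => decide (2 < (c.length : Int)))).map
    (fun c => (PySem.List.pyGet? c (-1)).getD 0)

theorem pvA_eq (cps : List (List Int)) :
    count_continuations cps = ((cps.foldl pvStepA []).length : Int) := rfl

theorem pvB_eq (cps : List (List Int)) :
    count_continuations_alt cps
      = ((PySem.List.sorted (pvLasts cps) (fun x => x) false).foldl pvStepB ((0 : Int), (none : Option Int))).1 := rfl

-- for a long sublist, A's c[len(c)-1] is B's c[-1]
theorem pvLast_eq (c : List Int) (h : 2 < (c.length : Int)) :
    (PySem.List.pyGet? c ((c.length : Int) - 1)).getD 0 = (PySem.List.pyGet? c (-1)).getD 0 := by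
  have h1 : ((c.length : Int) - 1) = ((c.length - 1 : Nat) : Int) := by omega
  rw [h1, PySem.List.pyGet?_natCast, PySem.List.pyGet?_neg_one, List.getLast?_eq_getElem?]

-- the inner `for existing in conts` loop computes membership
theorem pvFound_eq (conts : List Int) (last : Int) (b : Bool) :
    conts.foldl (fun found existing => if existing == last then true else found) b
      = (b || decide (last ∈ conts)) := by
  induction conts generalizing b with
  | nil => simp
  | cons x t ih =>
    rw [List.foldl_cons, ih]
    by_cases hx : x = last
    · simp [hx]
    · simp [hx, Ne.symm hx]

-- A's step in closed form
theorem pvStepA_eq (conts : List Int) (c : List Int) :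
    pvStepA conts c =
      if 2 < (c.length : Int) then
        (if (PySem.List.pyGet? c (-1)).getD 0 ∈ conts then conts
         else conts ++ [(PySem.List.pyGet? c (-1)).getD 0])
      else conts := by
  unfold pvStepA
  by_cases hc : 2 < (c.length : Int)
  · simp only [if_pos hc, pvFound_eq, Bool.false_or, pvLast_eq c hc]
    by_cases hm : (PySem.List.pyGet? c (-1)).getD 0 ∈ conts <;> simp [hm]
  · simp [hc]

-- A's fold keeps conts nodup, with toFinset = acc.toFinset ∪ (pvLasts cps).toFinset
theorem pvFoldA_spec (cps : List (List Int)) (acc : List Int) (hnd : acc.Nodup) :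
    (cps.foldl pvStepA acc).Nodup ∧
    (cps.foldl pvStepA acc).toFinset = acc.toFinset ∪ (pvLasts cps).toFinset := by
  induction cps generalizing acc with
  | nil => simp [pvLasts, hnd]
  | cons c t ih =>
    rw [List.foldl_cons, pvStepA_eq]
    by_cases hc : 2 < (c.length : Int)
    · set last := (PySem.List.pyGet? c (-1)).getD 0 with hlast
      have hL : pvLasts (c :: t) = last :: pvLasts t := by
        simp only [pvLasts, List.filter_cons, decide_eq_true_eq, if_pos hc, List.map_cons]
        rfl
      by_cases hm : last ∈ acc
      · simp only [if_pos hc, if_pos hm]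
        obtain ⟨h1, h2⟩ := ih acc hnd
        refine ⟨h1, ?_⟩
        rw [h2, hL]
        simp only [List.toFinset_cons, Finset.union_insert]
        rw [Finset.insert_eq_self.mpr (Finset.mem_union_left _ (List.mem_toFinset.mpr hm))]
      · simp only [if_pos hc, if_neg hm]
        have hnd' : (acc ++ [last]).Nodup := by
          refine List.nodup_append.mpr ⟨hnd, List.nodup_singleton _, fun a ha b hb => ?_⟩
          simp only [List.mem_singleton] at hb
          subst hb
          exact fun h => hm (h ▸ ha)
        obtain ⟨h1, h2⟩ := ih (acc ++ [last]) hnd'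
        refine ⟨h1, ?_⟩
        rw [h2, hL]
        simp only [List.toFinset_append, List.toFinset_cons, List.toFinset_nil,
          Finset.union_insert]
        ext y
        simp [or_comm, or_assoc]
    · simp only [if_neg hc]
      obtain ⟨h1, h2⟩ := ih acc hnd
      refine ⟨h1, ?_⟩
      rw [h2]
      simp only [pvLasts, List.filter_cons, decide_eq_true_eq, if_neg hc]

-- the run count B's scan computes
def pvRuns (p : Int) : List Int → Nat
  | [] => 0
  | x :: t => (if p = x then 0 else 1) + pvRuns x t

theorem pvFoldB_eq (l : List Int) (c : Int) (p : Int) :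
    (l.foldl pvStepB (c, some p)).1 = c + (pvRuns p l : Int) := by
  induction l generalizing c p with
  | nil => simp [pvRuns]
  | cons x t ih =>
    by_cases hx : p = x
    · simp [List.foldl, pvStepB, hx, ih, pvRuns]
    · simp [List.foldl, pvStepB, hx, ih, pvRuns]
      ring

-- on a sorted list bounded below by p, the run count is the number of distinct values other than p
theorem pvRuns_sorted (l : List Int) (p : Int)
    (hs : l.Pairwise (· ≤ ·)) (hp : ∀ y ∈ l, p ≤ y) :
    pvRuns p l = (l.toFinset.erase p).card := by
  induction l generalizing p with
  | nil => simp [pvRuns]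
  | cons x t ih =>
    have hx : ∀ y ∈ t, x ≤ y := (List.pairwise_cons.mp hs).1
    have ht : t.Pairwise (· ≤ ·) := (List.pairwise_cons.mp hs).2
    by_cases hpx : p = x
    · subst hpx
      rw [show pvRuns p (p :: t) = pvRuns p t from by simp [pvRuns]]
      rw [ih p ht hx, List.toFinset_cons, Finset.erase_insert_eq_erase]
    · have hpnot : p ∉ (x :: t).toFinset := by
        simp only [List.toFinset_cons, Finset.mem_insert, List.mem_toFinset]
        rintro (rfl | hm)
        · exact hpx rfl
        · exact absurd (hx p hm) (by
            have := lt_of_le_of_ne (hp x (by simp)) hpx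
            omega)
      rw [Finset.erase_eq_of_notMem hpnot]
      simp only [pvRuns, if_neg hpx]
      rw [ih x ht hx, List.toFinset_cons]
      by_cases hxt : x ∈ t.toFinset
      · rw [Finset.insert_eq_self.mpr hxt]
        rw [Finset.card_erase_of_mem hxt]
        have : 0 < t.toFinset.card := Finset.card_pos.mpr ⟨x, hxt⟩
        omega
      · rw [Finset.card_insert_of_notMem hxt, Finset.erase_eq_of_notMem hxt]
        omega

-- B's scan over a sorted list counts the distinct values
theorem pvB_card (cps : List (List Int)) :
    count_continuations_alt cps = ((pvLasts cps).toFinset.card : Int) := by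
  rw [pvB_eq]
  have hperm : (PySem.List.sorted (pvLasts cps) (fun x => x) false).Perm (pvLasts cps) :=
    PySem.List.sorted_perm _ _ _
  have hfin : (PySem.List.sorted (pvLasts cps) (fun x => x) false).toFinset = (pvLasts cps).toFinset :=
    List.toFinset_eq_of_perm _ _ hperm
  have hpw : (PySem.List.sorted (pvLasts cps) (fun x => x) false).Pairwise (· ≤ ·) := by
    have := PySem.List.sorted_pairwise (xs := pvLasts cps) (key := fun x => x)
    simpa using this
  rcases hsl : PySem.List.sorted (pvLasts cps) (fun x => x) false with _ | ⟨x, t⟩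
  · rw [← hfin, hsl]; simp
  · rw [hsl] at hpw hfin
    have hx : ∀ y ∈ t, x ≤ y := (List.pairwise_cons.mp hpw).1
    have ht : t.Pairwise (· ≤ ·) := (List.pairwise_cons.mp hpw).2
    simp only [List.foldl_cons]
    have hstep : pvStepB ((0 : Int), (none : Option Int)) x = (1, some x) := by
      simp [pvStepB]
    rw [hstep, pvFoldB_eq, pvRuns_sorted t x ht hx, ← hfin, List.toFinset_cons]
    by_cases hxt : x ∈ t.toFinset
    · rw [Finset.insert_eq_self.mpr hxt, Finset.card_erase_of_mem hxt]
      have : 0 < t.toFinset.card := Finset.card_pos.mpr ⟨x, hxt⟩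
      omega
    · rw [Finset.card_insert_of_notMem hxt, Finset.erase_eq_of_notMem hxt]
      omega

-- ===== VERDICT (by name: the statement is the Claim_ definition above) =====
theorem count_continuations_spec : Claim_equal_count_continuations := by
  intro cps _
  show count_continuations cps = count_continuations_alt cps
  obtain ⟨hnd, hfin⟩ := pvFoldA_spec cps [] (by simp)
  rw [pvA_eq, pvB_card, ← List.toFinset_card_of_nodup hnd, hfin]
  simp
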